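-- pv_equiv track=rewrite | github.com/OmarJr11/optimization | services/points_service.py | newPoint
-- ===== SOURCE A (Python) =====
-- INFINITY = 99999999999999999 #Infinito
--
-- def newPoint(pointsList: list, limitX: tuple, limitY: tuple):
--     xLess = INFINITY
--     xHigher = -INFINITY
--     yLess = INFINITY
--     yHigher = -INFINITY
--     for point in pointsList:
--         if point[0] >= limitX[0] and point[0] <= limitX[1] and point[1] >= limitY[0] and point[1] <= limitY[1]:
--             xLess = (xLess, point[0])[point[0] < xLess]
--             xHigher = (xHigher, point[0])[point[0] > xHigher]
--             yLess = (yLess, point[1])[point[1] < yLess]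
--             yHigher = (yHigher, point[1])[point[1] > yHigher]
--     return ((xLess + xHigher)//2, (yLess + yHigher)//2)
-- ===== SOURCE B (Python) =====
-- def newPoint(pointsList: list, limitX: tuple, limitY: tuple):
--     def bbox(pts):
--         # optional bounding box (xmin, xmax, ymin, ymax) of in-range points, divide & conquer
--         if not pts:
--             return None
--         if len(pts) == 1:
--             x, y = pts[0]
--             if limitX[0] <= x <= limitX[1] and limitY[0] <= y <= limitY[1]:
--                 return (x, x, y, y)
--             return None
--         mid = len(pts) // 2
--         l = bbox(pts[:mid])
--         r = bbox(pts[mid:])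
--         if l is None:
--             return r
--         if r is None:
--             return l
--         return (min(l[0], r[0]), max(l[1], r[1]), min(l[2], r[2]), max(l[3], r[3]))
--     b = bbox(pointsList)
--     if b is None:
--         return (0, 0)
--     return ((b[0] + b[1]) // 2, (b[2] + b[3]) // 2)
-- ===== Notes on version B (the rewrite author's own statement) =====
-- stated objective: alternative
-- what changed: A runs one linear loop keeping four sentinel-initialised running min/max accumulators (via tuple-indexing tricks); B is a sentinel-free divide-and-conquer that recursively computes an Optional bounding box of the in-range points by splitting the list in half and merging boxes, returning (0,0) for an empty box.
import Mathlib
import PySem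

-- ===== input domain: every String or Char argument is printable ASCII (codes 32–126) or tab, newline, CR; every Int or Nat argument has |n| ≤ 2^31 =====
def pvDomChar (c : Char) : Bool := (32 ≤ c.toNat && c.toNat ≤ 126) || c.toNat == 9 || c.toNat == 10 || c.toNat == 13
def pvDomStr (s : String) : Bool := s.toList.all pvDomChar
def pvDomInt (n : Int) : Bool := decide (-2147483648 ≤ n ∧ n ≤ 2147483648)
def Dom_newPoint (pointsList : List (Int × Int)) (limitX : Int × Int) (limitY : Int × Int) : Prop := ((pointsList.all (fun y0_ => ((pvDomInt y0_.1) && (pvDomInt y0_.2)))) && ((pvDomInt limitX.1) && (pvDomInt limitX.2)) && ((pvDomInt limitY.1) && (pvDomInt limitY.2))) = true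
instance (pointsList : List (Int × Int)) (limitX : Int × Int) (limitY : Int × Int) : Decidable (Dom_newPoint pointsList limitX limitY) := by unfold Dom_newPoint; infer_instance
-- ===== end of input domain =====

-- B replaces A's sentinel-initialised running min/max loop by a sentinel-free divide-and-conquer
-- over an Optional bounding box; objective: alternative algorithm, same results.

-- ===== PORT A =====
def pvINF : Int := 99999999999999999

-- the loop body of A: the in-range test and the four conditional (tuple-indexing) updates
def pvStepA (limitX : Int × Int) (limitY : Int × Int) (s : Int × Int × Int × Int)
    (point : Int × Int) : Int × Int × Int × Int :=
  -- s = (xLess, xHigher, yLess, yHigher)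
  if point.1 ≥ limitX.1 && point.1 ≤ limitX.2 && point.2 ≥ limitY.1 && point.2 ≤ limitY.2 then
    ((if point.1 < s.1 then point.1 else s.1),
     (if point.1 > s.2.1 then point.1 else s.2.1),
     (if point.2 < s.2.2.1 then point.2 else s.2.2.1),
     (if point.2 > s.2.2.2 then point.2 else s.2.2.2))
  else s

def newPoint (pointsList : List (Int × Int)) (limitX : Int × Int) (limitY : Int × Int) : Int × Int :=
  let st := pointsList.foldl (pvStepA limitX limitY) (pvINF, -pvINF, pvINF, -pvINF)
  (PySem.Int.floordiv (st.1 + st.2.1) 2, PySem.Int.floordiv (st.2.2.1 + st.2.2.2) 2)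

-- ===== PORT B =====
-- box of a single point, if in range (B's length-1 base case)
def pvLeafB (limitX : Int × Int) (limitY : Int × Int) (p : Int × Int) :
    Option (Int × Int × Int × Int) :=
  if limitX.1 ≤ p.1 && p.1 ≤ limitX.2 && limitY.1 ≤ p.2 && p.2 ≤ limitY.2 then
    some (p.1, p.1, p.2, p.2)
  else none

-- B's merge of two optional boxes (None = no in-range point)
def pvMergeB : Option (Int × Int × Int × Int) → Option (Int × Int × Int × Int) →
    Option (Int × Int × Int × Int)
  | none, r => r
  | l, none => l
  | some a, some b =>
      some (min a.1 b.1, max a.2.1 b.2.1, min a.2.2.1 b.2.2.1, max a.2.2.2 b.2.2.2)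

-- B's recursive bbox: split the list at len//2, recurse, merge
def pvBBoxB (limitX : Int × Int) (limitY : Int × Int) :
    List (Int × Int) → Option (Int × Int × Int × Int)
  | [] => none
  | [p] => pvLeafB limitX limitY p
  | p :: q :: t =>
      let mid := (p :: q :: t).length / 2
      pvMergeB (pvBBoxB limitX limitY ((p :: q :: t).take mid))
               (pvBBoxB limitX limitY ((p :: q :: t).drop mid))
  termination_by l => l.length
  decreasing_by all_goals simp [List.length_take, List.length_drop]; omega

def newPoint_alt (pointsList : List (Int × Int)) (limitX : Int × Int) (limitY : Int × Int) : Int × Int :=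
  match pvBBoxB limitX limitY pointsList with
  | none => (0, 0)
  | some b => (PySem.Int.floordiv (b.1 + b.2.1) 2, PySem.Int.floordiv (b.2.2.1 + b.2.2.2) 2)

-- ===== PRECONDITION & SPEC =====
def Spec_newPoint (pointsList : List (Int × Int)) (limitX : Int × Int) (limitY : Int × Int) (out : Int × Int) : Prop := out = newPoint_alt pointsList limitX limitY
instance (pointsList : List (Int × Int)) (limitX : Int × Int) (limitY : Int × Int) (out : Int × Int) : Decidable (Spec_newPoint pointsList limitX limitY out) := by unfold Spec_newPoint; infer_instance

-- ===== CLAIM (what is proved, stated in full; the proofs are below) =====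
def Claim_equal_newPoint : Prop := ∀ (pointsList : List (Int × Int)) (limitX : Int × Int) (limitY : Int × Int), Dom_newPoint pointsList limitX limitY → Spec_newPoint pointsList limitX limitY (newPoint pointsList limitX limitY)

-- ===== LEMMAS AND PROOFS =====

-- linearised reference: fold the merge-of-leaf over the list
def pvLin (limitX : Int × Int) (limitY : Int × Int) (l : List (Int × Int)) :
    Option (Int × Int × Int × Int) :=
  l.foldl (fun acc p => pvMergeB acc (pvLeafB limitX limitY p)) none

theorem pvMergeB_none_right (x : Option (Int × Int × Int × Int)) : pvMergeB x none = x := by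
  cases x <;> rfl

theorem pvMergeB_assoc (a b c : Option (Int × Int × Int × Int)) :
    pvMergeB (pvMergeB a b) c = pvMergeB a (pvMergeB b c) := by
  cases a <;> cases b <;> cases c <;>
    simp [pvMergeB, min_assoc, max_assoc]

theorem pv_foldl_shift (limitX limitY : Int × Int) (l : List (Int × Int))
    (x acc : Option (Int × Int × Int × Int)) :
    l.foldl (fun acc p => pvMergeB acc (pvLeafB limitX limitY p)) (pvMergeB x acc)
      = pvMergeB x (l.foldl (fun acc p => pvMergeB acc (pvLeafB limitX limitY p)) acc) := by
  induction l generalizing acc with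
  | nil => rfl
  | cons p t ih =>
    simp only [List.foldl_cons, pvMergeB_assoc]
    exact ih _

theorem pvLin_append (limitX limitY : Int × Int) (a b : List (Int × Int)) :
    pvLin limitX limitY (a ++ b) = pvMergeB (pvLin limitX limitY a) (pvLin limitX limitY b) := by
  unfold pvLin
  rw [List.foldl_append, ← pvMergeB_none_right
    (a.foldl (fun acc p => pvMergeB acc (pvLeafB limitX limitY p)) none), pv_foldl_shift]
  rw [pvMergeB_none_right]

theorem pvLin_cons (limitX limitY : Int × Int) (p : Int × Int) (t : List (Int × Int)) :
    pvLin limitX limitY (p :: t) = pvMergeB (pvLeafB limitX limitY p) (pvLin limitX limitY t) := by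
  have : (p :: t) = [p] ++ t := rfl
  rw [this, pvLin_append]; rfl

-- B's divide-and-conquer equals the linearised fold
theorem pvBBoxB_eq_lin (limitX limitY : Int × Int) (l : List (Int × Int)) :
    pvBBoxB limitX limitY l = pvLin limitX limitY l := by
  have H : ∀ n (l : List (Int × Int)), l.length ≤ n →
      pvBBoxB limitX limitY l = pvLin limitX limitY l := by
    intro n
    induction n with
    | zero =>
      intro l hl
      have : l = [] := List.eq_nil_of_length_eq_zero (Nat.le_zero.mp hl)
      subst this; rw [pvBBoxB]; rfl
    | succ n ih =>
      intro l hl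
      match l with
      | [] => rw [pvBBoxB]; rfl
      | [p] =>
        rw [pvBBoxB, pvLin_cons, show pvLin limitX limitY [] = none from rfl,
          pvMergeB_none_right]
      | p :: q :: t =>
        rw [pvBBoxB]
        have hlen : (p :: q :: t).length = t.length + 2 := by simp
        have h1 : ((p :: q :: t).take ((p :: q :: t).length / 2)).length ≤ n := by
          simp only [List.length_take, hlen] at *; omega
        have h2 : ((p :: q :: t).drop ((p :: q :: t).length / 2)).length ≤ n := by
          simp only [List.length_drop, hlen] at *; omega
        rw [ih _ h1, ih _ h2, ← pvLin_append, List.take_append_drop]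
  exact H l.length l le_rfl

-- A's state update absorbed into the merge-with-optional-box operator
def pvMergeS (s : Int × Int × Int × Int) (o : Option (Int × Int × Int × Int)) :
    Int × Int × Int × Int :=
  match o with
  | none => s
  | some u => (min s.1 u.1, max s.2.1 u.2.1, min s.2.2.1 u.2.2.1, max s.2.2.2 u.2.2.2)

theorem pvMergeS_merge (s : Int × Int × Int × Int)
    (u : Int × Int × Int × Int) (o : Option (Int × Int × Int × Int)) :
    pvMergeS (pvMergeS s (some u)) o = pvMergeS s (pvMergeB (some u) o) := by
  cases o with
  | none => rfl
  | some v => simp [pvMergeS, pvMergeB, min_assoc, max_assoc]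

theorem pv_foldA_lin (limitX limitY : Int × Int) (l : List (Int × Int)) :
    ∀ s, l.foldl (pvStepA limitX limitY) s = pvMergeS s (pvLin limitX limitY l) := by
  induction l with
  | nil => intro s; rfl
  | cons p t ih =>
    intro s
    rw [List.foldl_cons, ih, pvLin_cons]
    by_cases hc : (limitX.1 ≤ p.1 && p.1 ≤ limitX.2 && limitY.1 ≤ p.2 && p.2 ≤ limitY.2) = true
    · have hstep : pvStepA limitX limitY s p = pvMergeS s (some (p.1, p.1, p.2, p.2)) := by
        unfold pvStepA
        rw [if_pos (by simpa [ge_iff_le] using hc)]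
        simp only [pvMergeS]
        congr 1
        · rw [min_def]; split_ifs <;> omega
        congr 1
        · rw [max_def]; split_ifs <;> omega
        congr 1
        · rw [min_def]; split_ifs <;> omega
        · rw [max_def]; split_ifs <;> omega
      have hleaf : pvLeafB limitX limitY p = some (p.1, p.1, p.2, p.2) := by
        unfold pvLeafB; rw [if_pos hc]
      rw [hstep, hleaf, pvMergeS_merge]
    · have hstep : pvStepA limitX limitY s p = s := by
        unfold pvStepA
        rw [if_neg (by simpa [ge_iff_le] using hc)]
      have hleaf : pvLeafB limitX limitY p = none := by
        unfold pvLeafB; rw [if_neg hc]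
      rw [hstep, hleaf]
      rfl

-- every box produced by pvLin has coordinates of list members, hence bounded on Dom
theorem pvLin_bound (limitX limitY : Int × Int) (l : List (Int × Int))
    (hb : ∀ p ∈ l, -2147483648 ≤ p.1 ∧ p.1 ≤ 2147483648 ∧ -2147483648 ≤ p.2 ∧ p.2 ≤ 2147483648) :
    ∀ u, pvLin limitX limitY l = some u →
      (-2147483648 ≤ u.1 ∧ u.1 ≤ 2147483648) ∧ (-2147483648 ≤ u.2.1 ∧ u.2.1 ≤ 2147483648) ∧
      (-2147483648 ≤ u.2.2.1 ∧ u.2.2.1 ≤ 2147483648) ∧ (-2147483648 ≤ u.2.2.2 ∧ u.2.2.2 ≤ 2147483648) := by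
  induction l with
  | nil => intro u h; exact absurd h (by simp [pvLin])
  | cons p t ih =>
    intro u h
    rw [pvLin_cons] at h
    have hp := hb p (List.mem_cons_self)
    have hbt : ∀ q ∈ t, -2147483648 ≤ q.1 ∧ q.1 ≤ 2147483648 ∧ -2147483648 ≤ q.2 ∧ q.2 ≤ 2147483648 :=
      fun q hq => hb q (List.mem_cons_of_mem _ hq)
    by_cases hc : (limitX.1 ≤ p.1 && p.1 ≤ limitX.2 && limitY.1 ≤ p.2 && p.2 ≤ limitY.2) = true
    · rw [show pvLeafB limitX limitY p = some (p.1, p.1, p.2, p.2) from by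
        unfold pvLeafB; rw [if_pos hc]] at h
      cases htl : pvLin limitX limitY t with
      | none =>
        rw [htl, pvMergeB_none_right] at h
        obtain rfl := Option.some.inj h
        exact ⟨⟨hp.1, hp.2.1⟩, ⟨hp.1, hp.2.1⟩, ⟨hp.2.2.1, hp.2.2.2⟩, ⟨hp.2.2.1, hp.2.2.2⟩⟩
      | some v =>
        rw [htl] at h
        have hv := ih hbt v htl
        obtain rfl := Option.some.inj h.symm
        refine ⟨?_, ?_, ?_, ?_⟩ <;>
          constructor <;>
          simp only [le_min_iff, min_le_iff, le_max_iff, max_le_iff] <;>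
          omega
    · rw [show pvLeafB limitX limitY p = none from by unfold pvLeafB; rw [if_neg hc]] at h
      exact ih hbt u h

-- ===== VERDICT (by name: the statement is the Claim_ definition above) =====
theorem newPoint_spec : Claim_equal_newPoint := by
  intro pointsList limitX limitY hdom
  unfold Spec_newPoint newPoint newPoint_alt
  rw [pvBBoxB_eq_lin, pv_foldA_lin]
  have hb : ∀ p ∈ pointsList, -2147483648 ≤ p.1 ∧ p.1 ≤ 2147483648 ∧
      -2147483648 ≤ p.2 ∧ p.2 ≤ 2147483648 := by
    intro p hp
    unfold Dom_newPoint at hdom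
    simp only [Bool.and_eq_true, List.all_eq_true] at hdom
    have := hdom.1.1 p hp
    simp only [pvDomInt, decide_eq_true_eq] at this
    exact ⟨this.1.1, this.1.2, this.2.1, this.2.2⟩
  cases hlin : pvLin limitX limitY pointsList with
  | none =>
    simp only [pvMergeS]
    norm_num [pvINF, PySem.Int.floordiv]
  | some u =>
    have hu := pvLin_bound limitX limitY pointsList hb u hlin
    simp only [pvMergeS]
    have h1 : min pvINF u.1 = u.1 := min_eq_right (by unfold pvINF; omega)
    have h2 : max (-pvINF) u.2.1 = u.2.1 := max_eq_right (by unfold pvINF; omega)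
    have h3 : min pvINF u.2.2.1 = u.2.2.1 := min_eq_right (by unfold pvINF; omega)
    have h4 : max (-pvINF) u.2.2.2 = u.2.2.2 := max_eq_right (by unfold pvINF; omega)
    rw [h1, h2, h3, h4]
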